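-- pv_equiv track=rewrite | github.com/MMannuru/CS1301 | HW06.PY | showFinder
-- ===== SOURCE A (Python) =====
-- def showFinder(showPreferences):
--     watchDict = {}
--
--     for viewer, likedShows in showPreferences.items():
--         for show in likedShows:
--             if show not in watchDict:
--                 watchDict[show] = []
--
--             watchDict[show] += [viewer]
--
--     for show, people in watchDict.items():
--         people.sort(key=str.lower)
--
--     return watchDict
-- ===== SOURCE B (Python) =====
-- def showFinder(showPreferences):
--     # Different decomposition: collect the shows once in first-occurrence order,
--     # then build each show's viewer list directly as a sorted filtered scan --
--     # no incremental dict updates and no in-place per-show sort pass.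
--     allShows = dict.fromkeys(show for likedShows in showPreferences.values()
--                              for show in likedShows)
--     return {show: sorted((viewer for viewer, liked in showPreferences.items()
--                           for s in liked if s == show), key=str.lower)
--             for show in allShows}
-- ===== Notes on version B (the rewrite author's own statement) =====
-- stated objective: alternative
-- what changed: Instead of A's incremental dict of per-viewer appends followed by an in-place sort of every show's list, B collects the distinct shows once (dict.fromkeys, first-occurrence order) and builds each show's entry directly as sorted(filtered viewer scan, key=str.lower) in a dict comprehension; Pre_ only excludes association lists with duplicate viewer keys, which cannot occur in A's dict argument.
import Mathlib
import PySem

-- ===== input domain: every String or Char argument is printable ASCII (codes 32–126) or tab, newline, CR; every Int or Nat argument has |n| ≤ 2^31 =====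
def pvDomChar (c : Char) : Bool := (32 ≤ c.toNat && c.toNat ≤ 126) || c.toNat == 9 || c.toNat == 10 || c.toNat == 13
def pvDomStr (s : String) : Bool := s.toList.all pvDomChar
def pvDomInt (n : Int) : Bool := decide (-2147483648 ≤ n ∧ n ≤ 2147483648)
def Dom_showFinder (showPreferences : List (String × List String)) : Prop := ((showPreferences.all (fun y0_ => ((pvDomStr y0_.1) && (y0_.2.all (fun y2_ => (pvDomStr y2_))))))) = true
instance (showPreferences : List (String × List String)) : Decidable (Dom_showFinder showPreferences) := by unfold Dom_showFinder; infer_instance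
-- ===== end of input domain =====

-- B builds the index by a different decomposition (collect shows once, then one sorted filtered
-- scan per show) instead of A's incremental dict of appends followed by per-show in-place sorts;
-- objective: alternative (not claimed faster).

-- ===== PORT A =====
def showFinder (showPreferences : List (String × List String)) : List (String × List String) :=
  let wd : PySem.Dict String (List String) :=
    showPreferences.foldl (fun d p =>
      p.2.foldl (fun d sh =>
        -- if show not in watchDict: watchDict[show] = []
        let d1 := if d.contains sh then d else d.insert sh []
        -- watchDict[show] += [viewer]
        d1.insert sh (d1.getD sh [] ++ [p.1])) d) PySem.Dict.empty
  -- for show, people in watchDict.items(): people.sort(key=str.lower)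
  wd.items.map (fun q => (q.1, PySem.List.sorted q.2 (fun s => PySem.Str.lower s) false))

-- ===== PORT B =====
def showFinder_alt (showPreferences : List (String × List String)) : List (String × List String) :=
  -- allShows = dict.fromkeys(show for likedShows in showPreferences.values() for show in likedShows)
  let allShows := PySem.List.dedup (showPreferences.flatMap (fun p => p.2))
  -- {show: sorted((viewer for viewer, liked in items for s in liked if s == show), key=str.lower) for show in allShows}
  allShows.map (fun sh =>
    (sh, PySem.List.sorted
      (showPreferences.flatMap (fun p => (p.2.filter (fun s => s == sh)).map (fun _ => p.1)))
      (fun s => PySem.Str.lower s) false))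

-- ===== PRECONDITION & SPEC =====
-- Pre_ excludes association lists with duplicate viewer keys: A's argument is a Python dict, in
-- which duplicate keys cannot occur (a duplicate-key list has no faithful dict counterpart).
def Pre_showFinder (showPreferences : List (String × List String)) : Prop :=
  (showPreferences.map Prod.fst).Nodup
instance (showPreferences : List (String × List String)) : Decidable (Pre_showFinder showPreferences) := by unfold Pre_showFinder; infer_instance
def pvWitness_showFinder : (List (String × List String)) :=
  [("Ann", ["b", "a"]), ("bob", ["a"])]
def Spec_showFinder (showPreferences : List (String × List String)) (out : List (String × List String)) : Prop := out = showFinder_alt showPreferences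
instance (showPreferences : List (String × List String)) (out : List (String × List String)) : Decidable (Spec_showFinder showPreferences out) := by unfold Spec_showFinder; infer_instance

-- ===== CLAIM (what is proved, stated in full; the proofs are below) =====
def Claim_equal_showFinder : Prop := ∀ (showPreferences : List (String × List String)), Dom_showFinder showPreferences → Pre_showFinder showPreferences → Spec_showFinder showPreferences (showFinder showPreferences)

-- ===== LEMMAS AND PROOFS =====

-- A's guarded insert-append step is exactly Dict.modify with default [].
theorem stepA_eq_modify (d : PySem.Dict String (List String)) (k v : String) :
    (let d1 := if d.contains k then d else d.insert k ([] : List String)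
     d1.insert k (d1.getD k [] ++ [v])) = d.modify k [] (· ++ [v]) := by
  simp only [PySem.Dict.modify]
  split_ifs with h
  · rfl
  · have h' : d.contains k = false := by simpa using h
    rw [PySem.Dict.getD_insert_self, PySem.Dict.insert_insert_self,
      PySem.Dict.getD_of_not_contains d [] h']

-- A's nested loop is the flat loop over the (show, viewer) pair stream.
theorem nested_eq_flat (prefs : List (String × List String))
    (d : PySem.Dict String (List String)) :
    prefs.foldl (fun d p =>
        p.2.foldl (fun d sh =>
          let d1 := if d.contains sh then d else d.insert sh ([] : List String)
          d1.insert sh (d1.getD sh [] ++ [p.1])) d) d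
    = (prefs.flatMap (fun p => p.2.map (fun s => (s, p.1)))).foldl
        (fun d q => d.modify q.1 [] (· ++ [q.2])) d := by
  induction prefs generalizing d with
  | nil => rfl
  | cons p rest ih =>
    simp only [List.flatMap_cons, List.foldl_append, List.foldl_cons, ih]
    congr 1
    rw [List.foldl_map]
    have hf : (fun (d : PySem.Dict String (List String)) sh =>
        let d1 := if d.contains sh then d else d.insert sh ([] : List String)
        d1.insert sh (d1.getD sh [] ++ [p.1]))
        = fun d sh => d.modify sh [] (· ++ [p.1]) :=
      funext fun d => funext fun sh => stepA_eq_modify d sh p.1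
    rw [hf]

theorem showFinder_eq_alt (prefs : List (String × List String)) :
    showFinder prefs = showFinder_alt prefs := by
  unfold showFinder showFinder_alt
  rw [nested_eq_flat]
  dsimp only
  set L := prefs.flatMap (fun p => p.2.map (fun s => (s, p.1))) with hL
  set D := L.foldl (fun d q => d.modify q.1 [] (· ++ [q.2])) PySem.Dict.empty with hD
  have hnd : D.keys.Nodup := by
    rw [hD]
    exact PySem.Dict.nodup_keys_foldl_modify_key L (fun q => q.1) []
      (fun _ q => (· ++ [q.2])) PySem.Dict.empty PySem.Dict.nodup_keys_empty
  have hkeys : D.keys = PySem.Set.ofList (prefs.flatMap (fun p => p.2)) := by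
    rw [hD, PySem.Dict.keys_foldl_modify_key L (fun q => q.1) []
      (fun _ q => (· ++ [q.2])) PySem.Dict.empty, PySem.Dict.keys_empty,
      PySem.Set.update_nil_left]
    congr 1
    simp [hL, List.map_flatMap, Function.comp_def]
  have hget : ∀ c, D.getD c [] =
      prefs.flatMap (fun p => (p.2.filter (fun s => s == c)).map (fun _ => p.1)) := by
    intro c
    rw [hD, PySem.Dict.getD_foldl_modify_append L PySem.Dict.empty c]
    simp [hL, List.filter_flatMap, List.map_flatMap, List.filter_map, List.map_map,
      Function.comp_def, List.map_const']
  rw [PySem.Dict.items_eq_map_keys D hnd [], List.map_map, hkeys,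
    PySem.List.dedup_eq_ofList]
  refine List.map_congr_left ?_
  intro k _
  simp [hget k]

-- ===== VERDICT (by name: the statement is the Claim_ definition above) =====
theorem showFinder_spec : Claim_equal_showFinder := by
  intro prefs _ _
  exact showFinder_eq_alt prefs
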